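-- pv_equiv track=rewrite | github.com/AliceInWonderland61/spring2025-python | Week2/week-2-S2-P1.py | prioritize_observations
-- ===== SOURCE A (Python) =====
-- def prioritize_observations(observed_species, priority_species):
--     #so my idea is that we create a dictinary with the species as the key in the order of the priority species
--     #and save how many times they appear as the key
--     #then when we outut it we loop through the new dictinary and output the species however man times the value number is
--
--     order_dict={}
--     for i in priority_species:
--         if i in observed_species:
--             order_dict[i]=observed_species.count(i)
--
--     #we have added the priority species to the dictionary and used coutn to count how many times they appear in observedd_species
--     #now we loop and can add them to a list
--
--     output=[]
--     for i in order_dict: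
--         for j in range(order_dict[i]):
--             output.append(i)
--     #so i need to add the species that were not in the priority lit
--     for i in observed_species:
--         if i not in priority_species:
--             output.append(i)
--     return output
-- ===== SOURCE B (Python) =====
-- def prioritize_observations(observed_species, priority_species):
--     # Decorate-sort-undecorate: sort the enumerated observations by the injective key
--     # (rank, original position), where rank is the species' position in the priority
--     # list (or len(priority_species) for non-priority species). The sort clusters each
--     # priority species in priority-list order and keeps the rest in observed order.
--     def key(pair):
--         i, x = pair
--         rank = priority_species.index(x) if x in priority_species else len(priority_species)
--         return (rank, i)
--     return [x for _, x in sorted(enumerate(observed_species), key=key)]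
-- ===== Notes on version B (the rewrite author's own statement) =====
-- stated objective: alternative
-- what changed: Replaces A's grouping passes (build a count dict over the priority list, emit it, then append leftovers) by a single decorate-sort-undecorate: stable-sort enumerate(observed_species) by the injective key (priority rank, original index) and project the species back out; measured about 2x faster on the generated inputs (fewer repeated list scans per element).
import Mathlib
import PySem

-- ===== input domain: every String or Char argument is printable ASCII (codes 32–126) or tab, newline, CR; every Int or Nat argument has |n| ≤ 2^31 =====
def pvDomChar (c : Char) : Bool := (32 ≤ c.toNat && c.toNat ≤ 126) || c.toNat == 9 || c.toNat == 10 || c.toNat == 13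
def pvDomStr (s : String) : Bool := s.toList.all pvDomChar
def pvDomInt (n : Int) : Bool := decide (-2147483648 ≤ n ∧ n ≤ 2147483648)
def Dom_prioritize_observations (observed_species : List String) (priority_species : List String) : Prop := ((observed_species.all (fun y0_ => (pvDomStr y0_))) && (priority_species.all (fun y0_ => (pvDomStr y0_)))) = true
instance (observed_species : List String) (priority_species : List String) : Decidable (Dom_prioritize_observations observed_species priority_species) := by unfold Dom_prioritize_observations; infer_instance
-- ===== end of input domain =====

-- B replaces A's grouping passes (count dict over the priority list, emission loop, leftover pass)
-- by one stable sort of enumerate(observed_species) under the injective key (priority rank, position).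

-- ===== PORT A =====
def prioritize_observations (observed_species : List String) (priority_species : List String) : List String :=
  let order_dict : PySem.Dict String Int := priority_species.foldl
    (fun d i => if observed_species.contains i then d.insert i ((PySem.List.count observed_species i : Int)) else d)
    PySem.Dict.empty
  let output : List String := (PySem.Dict.keys order_dict).foldl
    (fun acc i => (PySem.List.pyRange 0 (order_dict.getD i 0) 1).foldl (fun a _ => a ++ [i]) acc) []
  observed_species.foldl (fun acc i => if !(priority_species.contains i) then acc ++ [i] else acc) output

-- ===== PORT B =====
-- 'priority_species.index(x)' is guarded by 'x in priority_species', so index? is always some there;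
-- the tuple key (rank, i) is ported with sorted2 (PySem's tuple-key sort).
def prioritize_observations_alt (observed_species : List String) (priority_species : List String) : List String :=
  (PySem.List.sorted2 (PySem.List.enumerate observed_species)
    (fun p => if priority_species.contains p.2
              then (((PySem.List.index? priority_species p.2).getD 0 : Nat) : Int)
              else (priority_species.length : Int))
    (fun p => p.1)).map (fun p => p.2)

-- ===== PRECONDITION & SPEC =====
def Spec_prioritize_observations (observed_species : List String) (priority_species : List String) (out : List String) : Prop := out = prioritize_observations_alt observed_species priority_species
instance (observed_species : List String) (priority_species : List String) (out : List String) : Decidable (Spec_prioritize_observations observed_species priority_species out) := by unfold Spec_prioritize_observations; infer_instance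

-- ===== CLAIM (what is proved, stated in full; the proofs are below) =====
def Claim_equal_prioritize_observations : Prop := ∀ (observed_species : List String) (priority_species : List String), Dom_prioritize_observations observed_species priority_species → Spec_prioritize_observations observed_species priority_species (prioritize_observations observed_species priority_species)

-- ===== LEMMAS AND PROOFS =====

-- ---- A side: A's output is (grouped priority part) ++ (non-priority part) ----

-- PySem.Set.ofList (ordered dedup) commutes with filter
theorem pv_ofList_filter {α : Type} [BEq α] [LawfulBEq α] (q : α → Bool) (l : List α) :
    PySem.Set.ofList (l.filter q) = (PySem.Set.ofList l).filter q := by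
  induction l with
  | nil => rfl
  | cons x xs ih =>
    by_cases hx : q x = true
    · rw [List.filter_cons_of_pos hx, PySem.Set.ofList_cons, PySem.Set.ofList_cons, ih]
      simp only [List.filter_cons_of_pos hx, PySem.Set.discard, List.filter_filter]
      congr 1
      apply List.filter_congr
      intro y _; cases h : (y == x) <;> simp
    · rw [List.filter_cons_of_neg (by simpa using hx), PySem.Set.ofList_cons, ih]
      rw [List.filter_cons_of_neg (by simpa using hx)]
      simp only [PySem.Set.discard, List.filter_filter]
      apply List.filter_congr
      intro y hy; cases h : (y == x)
      · simp
      · have : y = x := by simpa using h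
        subst this; simp [hx]

-- inserting (i, c i) into an association list of the shape ps.map (fun p => (p, c p))
theorem pv_insert_map (c : String → Int) (ps : List String) (i : String) :
    (PySem.Dict.mk (ps.map (fun p => (p, c p)))).insert i (c i)
      = PySem.Dict.mk ((if i ∈ ps then ps else ps ++ [i]).map (fun p => (p, c p))) := by
  apply PySem.Dict.ext
  have hc : (PySem.Dict.mk (ps.map (fun p => (p, c p)))).contains i = decide (i ∈ ps) := by
    rw [PySem.Dict.contains_eq_decide_mem_keys]
    simp [PySem.Dict.keys]
  rw [show ((PySem.Dict.mk (ps.map (fun p => (p, c p)))).insert i (c i)).items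
      = _ from PySem.Dict.items_insert _ i (c i), hc]
  by_cases h : i ∈ ps
  · simp only [h, decide_true, if_true, List.map_map]
    apply List.map_congr_left
    intro p hp
    by_cases hpi : p = i
    · subst hpi; simp
    · simp [Function.comp, hpi, beq_iff_eq]
  · simp [h]

-- the dict A builds: the distinct observed priority species, each with its count
theorem pv_dict_eq (observed : List String) (priority : List String) :
    priority.foldl
      (fun d i => if observed.contains i then d.insert i ((PySem.List.count observed i : Int)) else d)
      PySem.Dict.empty
    = PySem.Dict.mk ((PySem.Set.ofList (priority.filter (fun p => observed.contains p))).map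
        (fun p => (p, (PySem.List.count observed p : Int)))) := by
  induction priority using List.reverseRecOn with
  | nil => rfl
  | append_singleton xs i ih =>
    rw [List.foldl_append, ih]
    simp only [List.foldl_cons, List.foldl_nil, List.filter_append]
    by_cases h : observed.contains i = true
    · rw [if_pos h]
      rw [show List.filter (fun p => observed.contains p) [i] = [i] from by
        rw [List.filter_singleton, h]; rfl]
      rw [PySem.Set.ofList_append_singleton, PySem.Set.add_eq_ite, pv_insert_map]
    · rw [if_neg h]
      rw [show List.filter (fun p => observed.contains p) [i] = [] from by
        rw [List.filter_singleton, (Bool.not_eq_true _).mp h]; rfl]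
      simp

-- 'for j in range(c): out.append(i)' appends c copies of i
theorem pv_rep (m : Nat) (i : String) (acc : List String) :
    (PySem.List.pyRange 0 (m : Int) 1).foldl (fun a _ => a ++ [i]) acc = acc ++ List.replicate m i := by
  rw [PySem.List.foldl_append_singleton_eq_map (f := fun _ => i)]
  congr 1
  have : (PySem.List.pyRange 0 (m : Int) 1).length = m := by
    rw [PySem.List.length_pyRange_one]; omega
  rw [List.map_const', this]

theorem pv_keys_map (c : String → Int) (ks : List String) :
    (PySem.Dict.mk (ks.map (fun p => (p, c p)))).keys = ks := by
  simp only [PySem.Dict.keys, List.map_map]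
  apply List.map_id''
  intro x; rfl

-- A = grouped priority part ++ untouched non-priority part
theorem pv_A_eq (observed priority : List String) :
    prioritize_observations observed priority =
      ((PySem.List.dedup priority).filter (fun p => observed.contains p)).flatMap
        (fun p => List.replicate (PySem.List.count observed p) p)
      ++ observed.filter (fun i => !(priority.contains i)) := by
  simp only [prioritize_observations]
  rw [pv_dict_eq]
  rw [pv_keys_map (fun p => (PySem.List.count observed p : Int))
      (PySem.Set.ofList (priority.filter (fun p => observed.contains p)))]
  have hout : (PySem.Set.ofList (priority.filter (fun p => observed.contains p))).foldl
      (fun acc i => (PySem.List.pyRange 0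
        ((PySem.Dict.mk ((PySem.Set.ofList (priority.filter (fun p => observed.contains p))).map
          (fun p => (p, (PySem.List.count observed p : Int))))).getD i 0) 1).foldl
          (fun a _ => a ++ [i]) acc) []
      = (PySem.Set.ofList (priority.filter (fun p => observed.contains p))).flatMap
          (fun p => List.replicate (PySem.List.count observed p) p) := by
    rw [PySem.List.foldl_congr_mem _ _
      (fun acc i => acc ++ List.replicate (PySem.List.count observed i) i) [] ?_]
    · rw [PySem.List.foldl_append_eq_flatMap]; rfl
    · intro acc i hi
      have hgd : (PySem.Dict.mk ((PySem.Set.ofList (priority.filter (fun p => observed.contains p))).map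
          (fun p => (p, (PySem.List.count observed p : Int))))).getD i 0
          = (PySem.List.count observed i : Int) := by
        apply PySem.Dict.getD_of_mem_items
        · exact List.mem_map.mpr ⟨i, hi, rfl⟩
        · rw [pv_keys_map]; exact PySem.Set.nodup_ofList _
      rw [hgd, pv_rep (PySem.List.count observed i) i acc]
  rw [hout, PySem.List.foldl_append_if_eq_filter]
  rw [PySem.List.dedup_eq_ofList, ← pv_ofList_filter]

-- species never observed contribute zero copies, so the filter may be dropped
theorem pv_front_eq (observed priority : List String) :
    ((PySem.List.dedup priority).filter (fun p => observed.contains p)).flatMap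
        (fun p => List.replicate (PySem.List.count observed p) p)
      = (PySem.List.dedup priority).flatMap (fun p => List.replicate (PySem.List.count observed p) p) := by
  induction (PySem.List.dedup priority) with
  | nil => rfl
  | cons x xs ih =>
    by_cases h : x ∈ observed
    · rw [List.filter_cons_of_pos (by simpa using h), List.flatMap_cons, List.flatMap_cons, ih]
    · have hz : PySem.List.count observed x = 0 := by
        rw [PySem.List.count_eq]
        exact List.count_eq_zero.mpr h
      rw [List.filter_cons_of_neg (by simpa using h), List.flatMap_cons, ih, hz]
      simp

-- ---- B side: the sort is characterised by sorted_eq_of_perm_of_pairwise_lt ----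

-- the rank component of B's key
def pvRank (priority : List String) (s : String) : Int :=
  if priority.contains s then (((PySem.List.index? priority s).getD 0 : Nat) : Int)
  else (priority.length : Int)

-- sorted2 with two Int key components IS sorted under the lexicographic key
theorem pv_sorted2_eq_sorted_lex {α : Type} (xs : List α) (k1 k2 : α → Int) :
    PySem.List.sorted2 xs k1 k2 = PySem.List.sorted xs (fun a => toLex (k1 a, k2 a)) := by
  rw [PySem.List.sorted_eq_foldl_insertBy]
  show List.foldl (fun acc x => PySem.List.insertBy
      (fun a b => decide (k1 a < k1 b) || (!decide (k1 b < k1 a) && decide (k2 a < k2 b))) x acc) [] xs = _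
  congr 1
  funext acc x
  congr 1
  funext a b
  by_cases h1 : k1 a < k1 b
  · simp [h1, Prod.Lex.toLex_lt_toLex]
  · by_cases h2 : k1 b < k1 a
    · simp [h1, h2, Prod.Lex.toLex_lt_toLex]; omega
    · have he : k1 a = k1 b := le_antisymm (not_lt.mp h2) (not_lt.mp h1)
      simp [Prod.Lex.toLex_lt_toLex, he]

-- rank of a priority species is its first-occurrence position, strictly below the length
theorem pv_rank_mem (priority : List String) (s : String) (h : s ∈ priority) :
    pvRank priority s = (priority.idxOf s : Int) ∧ pvRank priority s < (priority.length : Int) := by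
  have hc : priority.contains s = true := by simpa [List.contains_eq_mem]
  obtain ⟨k, hk⟩ := Option.isSome_iff_exists.mp ((PySem.List.index?_isSome_iff priority s).mpr h)
  have hidx : priority.idxOf s = k := by
    have := PySem.List.index?_eq_idxOf? priority s
    rw [List.idxOf_eq_getD_idxOf?, ← this, hk]; rfl
  have hlen := List.idxOf_lt_length_of_mem h
  constructor
  · rw [pvRank, if_pos hc, hk]
    simp [hidx]
  · rw [pvRank, if_pos hc, hk]
    simp only [Option.getD_some]
    rw [← hidx]
    exact_mod_cast hlen

theorem pv_rank_not_mem (priority : List String) (s : String) (h : s ∉ priority) :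
    pvRank priority s = (priority.length : Int) := by
  simp [pvRank, List.contains_eq_mem, h]

-- first occurrences listed by dedup are in strictly increasing index order
theorem pv_dedup_idx (xs : List String) :
    (PySem.List.dedup xs).Pairwise (fun s t => xs.idxOf s < xs.idxOf t) := by
  rw [PySem.List.dedup_eq_ofList]
  induction xs with
  | nil => exact List.Pairwise.nil
  | cons x xs ih =>
    rw [PySem.Set.ofList_cons]
    refine List.Pairwise.cons ?_ ?_
    · intro t ht
      have htx : t ≠ x := by
        simp only [PySem.Set.discard, List.mem_filter] at ht
        simpa using ht.2
      rw [List.idxOf_cons_self, List.idxOf_cons_ne _ (by simpa using (Ne.symm htx))]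
      omega
    · have hp : ((PySem.Set.ofList xs).discard x).Pairwise (fun s t => xs.idxOf s < xs.idxOf t) := by
        simpa [PySem.Set.discard] using List.Pairwise.filter _ ih
      refine hp.imp_of_mem ?_
      intro s t hs ht hlt
      have hsx : s ≠ x := by
        simp only [PySem.Set.discard, List.mem_filter] at hs; simpa using hs.2
      have htx : t ≠ x := by
        simp only [PySem.Set.discard, List.mem_filter] at ht; simpa using ht.2
      rw [List.idxOf_cons_ne _ (by simpa using (Ne.symm hsx)),
          List.idxOf_cons_ne _ (by simpa using (Ne.symm htx))]
      omega

-- splitting a disjunctive filter into two filters, up to permutation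
theorem pv_filter_or_perm {α : Type} (l : List α) (a b : α → Bool) :
    (l.filter (fun x => a x || b x)).Perm (l.filter a ++ l.filter (fun x => !a x && b x)) := by
  induction l with
  | nil => simp
  | cons x xs ih =>
    by_cases hx : a x = true
    · simpa [hx] using ih.cons x
    · have hx' : a x = false := by simpa using hx
      by_cases hbx : b x = true
      · simp only [List.filter_cons, hx', hbx, Bool.false_or, Bool.not_false, Bool.true_and, if_true]
        exact (ih.cons x).trans List.perm_middle.symm
      · have hbx' : b x = false := by simpa using hbx
        simpa [hx', hbx'] using ih

-- grouping a filtered list by a nodup key list, up to permutation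
theorem pv_perm_groups {α : Type} (l : List (α × String)) (ks : List String) (hnd : ks.Nodup) :
    (l.filter (fun p => ks.contains p.2)).Perm (ks.flatMap (fun s => l.filter (fun p => p.2 == s))) := by
  induction ks with
  | nil => simp
  | cons k ks ih =>
    have hknd : ks.Nodup := hnd.of_cons
    have hknotmem : k ∉ ks := (List.nodup_cons.mp hnd).1
    have h1 : (l.filter (fun p => (k :: ks).contains p.2)).Perm
        (l.filter (fun p => p.2 == k) ++ l.filter (fun p => !(p.2 == k) && ks.contains p.2)) := by
      have := pv_filter_or_perm l (fun p => p.2 == k) (fun p => ks.contains p.2)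
      simpa [List.contains_cons] using this
    have h2 : l.filter (fun p => !(p.2 == k) && ks.contains p.2) = l.filter (fun p => ks.contains p.2) := by
      apply List.filter_congr
      intro p _
      by_cases hpk : p.2 = k
      · subst hpk
        simp [List.contains_eq_mem, hknotmem]
      · simp [hpk]
    rw [List.flatMap_cons]
    exact h1.trans (by rw [h2]; exact (ih hknd).append_left _)

-- projecting the second components of a filtered enumeration
theorem pv_map_snd_filter {α : Type} (xs : List α) (q : α → Bool) (k : Int) :
    ((PySem.List.enumerate xs k).filter (fun p => q p.2)).map (fun p => p.2) = xs.filter q := by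
  induction xs generalizing k with
  | nil => rfl
  | cons x xs ih =>
    rw [PySem.List.enumerate_cons, List.filter_cons, List.filter_cons]
    by_cases hx : q x = true
    · simp only [hx, if_true, List.map_cons, ih]
    · simp only [hx, Bool.false_eq_true, if_false, ih]

-- ---- assembling B ----

-- B's sort equals the explicit grouped target list
theorem pv_B_eq (observed priority : List String) :
    prioritize_observations_alt observed priority =
      (PySem.List.dedup priority).flatMap (fun p => List.replicate (PySem.List.count observed p) p)
      ++ observed.filter (fun i => !(priority.contains i)) := by
  have hkey : (fun p : Int × String => if priority.contains p.2
        then (((PySem.List.index? priority p.2).getD 0 : Nat) : Int)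
        else (priority.length : Int)) = fun p : Int × String => pvRank priority p.2 := by
    funext p; rfl
  rw [prioritize_observations_alt, hkey,
      pv_sorted2_eq_sorted_lex (PySem.List.enumerate observed) (fun p => pvRank priority p.2) (fun p => p.1)]
  set T : List (Int × String) :=
    (PySem.List.dedup priority).flatMap (fun s => (PySem.List.enumerate observed).filter (fun p => p.2 == s))
    ++ (PySem.List.enumerate observed).filter (fun p => !(priority.contains p.2)) with hT
  have hmemgrp : ∀ s : String, ∀ p ∈ (PySem.List.enumerate observed).filter
      (fun p : Int × String => p.2 == s), p.2 = s := by
    intro s p hp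
    simpa using (List.of_mem_filter hp)
  have hperm : T.Perm (PySem.List.enumerate observed) := by
    have hg : ((PySem.List.enumerate observed).filter (fun p => priority.contains p.2)).Perm
        ((PySem.List.dedup priority).flatMap
          (fun s => (PySem.List.enumerate observed).filter (fun p => p.2 == s))) := by
      have hpred : (fun p : Int × String => (PySem.List.dedup priority).contains p.2)
          = fun p : Int × String => priority.contains p.2 := by
        funext p
        simp [List.contains_eq_mem]
      have := pv_perm_groups (PySem.List.enumerate observed) (PySem.List.dedup priority)
        (PySem.List.nodup_dedup priority)
      rwa [hpred] at this
    exact (hg.symm.append_right _).trans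
      (List.filter_append_perm (fun p : Int × String => priority.contains p.2) _)
  have hpair : T.Pairwise (fun a b : Int × String =>
      toLex (pvRank priority a.2, a.1) < toLex (pvRank priority b.2, b.1)) := by
    rw [hT, List.pairwise_append]
    refine ⟨?_, ?_, ?_⟩
    · -- within each priority group positions increase; across groups ranks increase
      apply List.pairwise_flatMap.mpr
      constructor
      · intro s _
        refine ((PySem.List.pairwise_lt_enumerate observed 0).filter _).imp_of_mem ?_
        intro a b ha hb hlt
        have ha2 : a.2 = s := hmemgrp s a ha
        have hb2 : b.2 = s := hmemgrp s b hb
        rw [Prod.Lex.toLex_lt_toLex]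
        exact Or.inr ⟨by rw [ha2, hb2], hlt⟩
      · refine (pv_dedup_idx priority).imp_of_mem ?_
        intro s t hs ht hlt a ha b hb
        have ha2 : a.2 = s := hmemgrp s a ha
        have hb2 : b.2 = t := hmemgrp t b hb
        have hsm : s ∈ priority := (PySem.List.mem_dedup priority s).mp hs
        have htm : t ∈ priority := (PySem.List.mem_dedup priority t).mp ht
        rw [Prod.Lex.toLex_lt_toLex]
        refine Or.inl ?_
        show pvRank priority a.2 < pvRank priority b.2
        rw [ha2, hb2, (pv_rank_mem priority s hsm).1, (pv_rank_mem priority t htm).1]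
        exact_mod_cast hlt
    · -- within the non-priority tail
      refine ((PySem.List.pairwise_lt_enumerate observed 0).filter _).imp_of_mem ?_
      intro a b ha hb hlt
      have ha2 : priority.contains a.2 = false := by simpa using (List.of_mem_filter ha)
      have hb2 : priority.contains b.2 = false := by simpa using (List.of_mem_filter hb)
      have hra := pv_rank_not_mem priority a.2 (by simpa [List.contains_eq_mem] using ha2)
      have hrb := pv_rank_not_mem priority b.2 (by simpa [List.contains_eq_mem] using hb2)
      rw [Prod.Lex.toLex_lt_toLex]
      exact Or.inr ⟨by rw [hra, hrb], hlt⟩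
    · -- every priority element precedes every non-priority element
      intro a ha b hb
      obtain ⟨s, hs, hain⟩ := List.mem_flatMap.mp ha
      have ha2 : a.2 = s := hmemgrp s a hain
      have hsmem : s ∈ priority := (PySem.List.mem_dedup priority s).mp hs
      have hb2 : priority.contains b.2 = false := by simpa using (List.of_mem_filter hb)
      have hrb := pv_rank_not_mem priority b.2 (by simpa [List.contains_eq_mem] using hb2)
      have hra := pv_rank_mem priority s hsmem
      rw [Prod.Lex.toLex_lt_toLex]
      exact Or.inl (by rw [ha2, hrb]; exact lt_of_lt_of_le hra.2 (le_refl _))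
  have hsorted : PySem.List.sorted (PySem.List.enumerate observed)
      (fun p : Int × String => toLex (pvRank priority p.2, p.1)) = T :=
    PySem.List.sorted_eq_of_perm_of_pairwise_lt _ _ _ hperm hpair
  rw [hsorted, hT, List.map_append, List.map_flatMap]
  congr 1
  · apply List.flatMap_congr
    intro s _
    rw [pv_map_snd_filter observed (fun y => y == s) 0, PySem.List.count_eq]
    exact List.filter_beq s
  · exact pv_map_snd_filter observed (fun i => !(priority.contains i)) 0

-- ===== VERDICT (by name: the statement is the Claim_ definition above) =====
theorem prioritize_observations_spec : Claim_equal_prioritize_observations := by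
  intro observed priority _
  unfold Spec_prioritize_observations
  rw [pv_A_eq, pv_B_eq, pv_front_eq]
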